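-- pv_equiv track=rewrite | github.com/lungbean23/-ROOF | writers_room/director.py | _parse_directive
-- ===== SOURCE A (Python) =====
-- from typing import List, Dict, Any
--
-- def _parse_directive(decision_text: str) -> Dict[str, Any]:
--     """Parse DeepSeek's decision into structured directive"""
--
--     # Extract TYPE
--     intervention_type = "CONTINUE"  # Default
--     if "TYPE:" in decision_text:
--         type_line = [line for line in decision_text.split('\n') if 'TYPE:' in line][0]
--         type_text = type_line.split('TYPE:')[1].strip()
--
--         # Match to valid types
--         for valid_type in ["STEER", "CHALLENGE", "DEEPEN", "PIVOT", "CONTINUE"]: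
--             if valid_type in type_text.upper():
--                 intervention_type = valid_type
--                 break
--
--     # Extract INSTRUCTION
--     instruction = ""
--     if "INSTRUCTION:" in decision_text:
--         instruction_line = [line for line in decision_text.split('\n') if 'INSTRUCTION:' in line]
--         if instruction_line:
--             instruction = instruction_line[0].split('INSTRUCTION:')[1].strip()
--
--     # Extract REASON
--     reason = ""
--     if "REASON:" in decision_text:
--         reason_line = [line for line in decision_text.split('\n') if 'REASON:' in line]
--         if reason_line:
--             reason = reason_line[0].split('REASON:')[1].strip()
--
--     return {
--         "type": intervention_type,
--         "instruction": instruction,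
--         "reason": reason,
--         "full_text": decision_text
--     }
-- ===== SOURCE B (Python) =====
-- def _parse_directive(decision_text: str):
--     """Single pass over the lines, recording the first line for each marker."""
--     found = {"TYPE:": None, "INSTRUCTION:": None, "REASON:": None}
--     for line in decision_text.split('\n'):
--         for m in found:
--             if found[m] is None and m in line:
--                 found[m] = line.split(m)[1]
--     intervention_type = "CONTINUE"
--     if found["TYPE:"] is not None:
--         u = found["TYPE:"].strip().upper()
--         for vt in ["STEER", "CHALLENGE", "DEEPEN", "PIVOT", "CONTINUE"]:
--             if vt in u:
--                 intervention_type = vt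
--                 break
--     return {
--         "type": intervention_type,
--         "instruction": (found["INSTRUCTION:"] or "").strip(),
--         "reason": (found["REASON:"] or "").strip(),
--         "full_text": decision_text,
--     }
-- ===== Notes on version B (the rewrite author's own statement) =====
-- stated objective: simpler
-- what changed: B splits the text into lines once and scans them in a single pass, recording the first line for each of the three markers, instead of A's separate membership test plus full filter pass per marker.
import Mathlib
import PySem

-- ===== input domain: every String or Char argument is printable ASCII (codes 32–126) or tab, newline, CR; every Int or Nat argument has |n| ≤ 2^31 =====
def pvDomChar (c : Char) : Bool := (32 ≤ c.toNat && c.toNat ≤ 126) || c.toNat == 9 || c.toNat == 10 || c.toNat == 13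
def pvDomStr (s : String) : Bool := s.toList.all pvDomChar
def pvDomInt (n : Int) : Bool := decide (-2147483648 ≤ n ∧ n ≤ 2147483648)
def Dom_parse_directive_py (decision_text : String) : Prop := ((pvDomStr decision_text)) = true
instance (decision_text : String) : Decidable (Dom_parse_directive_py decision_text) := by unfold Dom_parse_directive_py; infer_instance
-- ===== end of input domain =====

-- B re-implements the parsing as one pass over the lines instead of A's three filter passes; objective: simpler.

-- ===== PORT A =====
-- 'for valid_type in [...]: if valid_type in <txt>: type = valid_type; break' — the loop both Pythons contain verbatim
def pvMatchType : List String → String → String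
  | [], _ => "CONTINUE"
  | v :: rest, u => if PySem.Str.isIn v u then v else pvMatchType rest u

def pvValidTypes : List String := ["STEER", "CHALLENGE", "DEEPEN", "PIVOT", "CONTINUE"]

-- line.split(marker)[1]; Python's [1] exists whenever the line contains the marker, so the getD default is never used there
-- (s.split(sep) is PySem.Str.split?, none only for sep = "", which never happens here)
def pvAfter (line marker : String) : String :=
  ((PySem.Str.split? line marker).getD []).getD 1 ""

def parse_directive_py (decision_text : String) : List (String × String) :=
  let intervention_type :=
    if PySem.Str.isIn "TYPE:" decision_text then
      match ((PySem.Str.split? decision_text "\n").getD []).filter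
          (fun line => PySem.Str.isIn "TYPE:" line) with
      | [] => "CONTINUE"  -- Python raises IndexError here; unreachable ("TYPE:" has no newline, so it occurs inside some line)
      | type_line :: _ =>
        let type_text := PySem.Str.strip (pvAfter type_line "TYPE:")
        pvMatchType pvValidTypes (PySem.Str.upper type_text)
    else "CONTINUE"
  let instruction :=
    if PySem.Str.isIn "INSTRUCTION:" decision_text then
      match ((PySem.Str.split? decision_text "\n").getD []).filter
          (fun line => PySem.Str.isIn "INSTRUCTION:" line) with
      | [] => ""
      | l :: _ => PySem.Str.strip (pvAfter l "INSTRUCTION:")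
    else ""
  let reason :=
    if PySem.Str.isIn "REASON:" decision_text then
      match ((PySem.Str.split? decision_text "\n").getD []).filter
          (fun line => PySem.Str.isIn "REASON:" line) with
      | [] => ""
      | l :: _ => PySem.Str.strip (pvAfter l "REASON:")
    else ""
  [("type", intervention_type), ("instruction", instruction),
   ("reason", reason), ("full_text", decision_text)]

-- ===== PORT B =====
-- 'if found[m] is None and m in line: found[m] = line.split(m)[1]'
def pvUpd (cur : Option String) (m line : String) : Option String :=
  match cur with
  | some v => some v
  | none => if PySem.Str.isIn m line then some (pvAfter line m) else none

def parse_directive_py_alt (decision_text : String) : List (String × String) :=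
  let st := ((PySem.Str.split? decision_text "\n").getD []).foldl
    (fun (st : Option String × Option String × Option String) line =>
      (pvUpd st.1 "TYPE:" line, pvUpd st.2.1 "INSTRUCTION:" line, pvUpd st.2.2 "REASON:" line))
    (none, none, none)
  let intervention_type :=
    match st.1 with
    | none => "CONTINUE"
    | some raw => pvMatchType pvValidTypes (PySem.Str.upper (PySem.Str.strip raw))
  [("type", intervention_type),
   ("instruction", PySem.Str.strip (st.2.1.getD "")),
   ("reason", PySem.Str.strip (st.2.2.getD "")),
   ("full_text", decision_text)]

-- ===== PRECONDITION & SPEC =====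
def Spec_parse_directive_py (decision_text : String) (out : List (String × String)) : Prop := out = parse_directive_py_alt decision_text
instance (decision_text : String) (out : List (String × String)) : Decidable (Spec_parse_directive_py decision_text out) := by unfold Spec_parse_directive_py; infer_instance

-- ===== CLAIM (what is proved, stated in full; the proofs are below) =====
def Claim_equal_parse_directive_py : Prop := ∀ (decision_text : String), Dom_parse_directive_py decision_text → Spec_parse_directive_py decision_text (parse_directive_py decision_text)

-- ===== LEMMAS AND PROOFS =====

-- every piece produced by splitOn.go is an earlier accumulator entry, cur.reverse ++ a prefix of l, or an infix of l
lemma pv_go_infix (sep : List Char) (fuel : Nat) :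
    ∀ (l cur : List Char) (acc : List (List Char)) (x : List Char),
      x ∈ PySem.Chars.splitOn.go sep fuel l cur acc →
      x ∈ acc ∨ (∃ t, t <+: l ∧ x = cur.reverse ++ t) ∨ (∃ t, t <:+: l ∧ x = t) := by
  induction fuel with
  | zero =>
    intro l cur acc x hx
    rw [PySem.Chars.splitOn.go] at hx
    simp only [List.mem_reverse, List.mem_cons] at hx
    rcases hx with rfl | hx
    · exact Or.inr (Or.inl ⟨l, List.prefix_refl l, rfl⟩)
    · exact Or.inl hx
  | succ fuel ih =>
    intro l cur acc x hx
    match l with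
    | [] =>
      rw [PySem.Chars.splitOn.go] at hx
      · simp only [List.mem_reverse, List.mem_cons] at hx
        rcases hx with rfl | hx
        · exact Or.inr (Or.inl ⟨[], List.nil_prefix, by simp⟩)
        · exact Or.inl hx
      · omega
    | c :: rest =>
      rw [PySem.Chars.splitOn.go] at hx
      split at hx
      · rcases ih _ _ _ _ hx with hmem | ⟨t, ht, hxe⟩ | ⟨t, ht, hxe⟩
        · rcases List.mem_cons.mp hmem with hxe | hmem
          · exact Or.inr (Or.inl ⟨[], List.nil_prefix, by simp [hxe]⟩)
          · exact Or.inl hmem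
        · exact Or.inr (Or.inr ⟨t, ht.isInfix.trans (List.drop_suffix _ _).isInfix, by simpa using hxe⟩)
        · exact Or.inr (Or.inr ⟨t, ht.trans (List.drop_suffix _ _).isInfix, hxe⟩)
      · rcases ih _ _ _ _ hx with hmem | ⟨t, ht, hxe⟩ | ⟨t, ht, hxe⟩
        · exact Or.inl hmem
        · exact Or.inr (Or.inl ⟨c :: t, List.cons_prefix_cons.mpr ⟨rfl, ht⟩, by simp [hxe]⟩)
        · exact Or.inr (Or.inr ⟨t, ht.trans (List.suffix_cons c rest).isInfix, hxe⟩)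

lemma pv_mem_splitOn_infix (s sep x : List Char) (h : x ∈ PySem.Chars.splitOn s sep) : x <:+: s := by
  unfold PySem.Chars.splitOn at h
  rcases pv_go_infix sep (s.length + 1) s [] [] x h with h | ⟨t, ht, rfl⟩ | ⟨t, ht, rfl⟩
  · simp at h
  · simpa using ht.isInfix
  · exact ht

-- a marker found inside a line of s.split('\n') is found inside s
lemma pv_isIn_of_mem_lines (s m line : String)
    (hmem : line ∈ (PySem.Str.split? s "\n").getD [])
    (hin : PySem.Str.isIn m line = true) : PySem.Str.isIn m s = true := by
  simp [PySem.Str.split?, PySem.Chars.split?, show ("\n" : String).toList = ['\n'] from rfl] at hmem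
  obtain ⟨cs, hcs, rfl⟩ := hmem
  rw [PySem.Str.isIn_iff_infix] at hin ⊢
  rw [String.toList_ofList] at hin
  exact hin.trans (pv_mem_splitOn_infix s.toList _ cs hcs)

-- the B fold acts on the three components independently
lemma pv_foldl_triple (lines : List String) (x y z : Option String) :
    lines.foldl
      (fun (st : Option String × Option String × Option String) line =>
        (pvUpd st.1 "TYPE:" line, pvUpd st.2.1 "INSTRUCTION:" line, pvUpd st.2.2 "REASON:" line))
      (x, y, z)
    = (lines.foldl (fun s l => pvUpd s "TYPE:" l) x,
       lines.foldl (fun s l => pvUpd s "INSTRUCTION:" l) y,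
       lines.foldl (fun s l => pvUpd s "REASON:" l) z) := by
  induction lines generalizing x y z with
  | nil => rfl
  | cons a t ih => simp [List.foldl, ih]

lemma pv_foldl_upd_some (lines : List String) (m : String) (v : String) :
    lines.foldl (fun s l => pvUpd s m l) (some v) = some v := by
  induction lines with
  | nil => rfl
  | cons a t ih => simpa [pvUpd] using ih

-- the one-pass scan keeps exactly the first matching line's payload
lemma pv_scan_eq (lines : List String) (m : String) :
    lines.foldl (fun s l => pvUpd s m l) none
      = (lines.filter (fun l => PySem.Str.isIn m l)).head?.map (fun l => pvAfter l m) := by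
  induction lines with
  | nil => rfl
  | cons a t ih =>
    rw [List.foldl_cons]
    by_cases h : PySem.Chars.isIn m.toList a.toList = true
    · rw [show pvUpd none m a = some (pvAfter a m) from by simp [pvUpd, h],
        pv_foldl_upd_some]
      simp [h]
    · simp only [Bool.not_eq_true] at h
      rw [show pvUpd none m a = none from by simp [pvUpd, h], ih]
      simp [h]

-- ===== VERDICT (by name: the statement is the Claim_ definition above) =====
-- a nonempty [line for line in lines if m in line] forces the 'if m in decision_text' guard to be true
lemma pv_guard_of_filter_cons (s m l : String) (t : List String)
    (hf : ((PySem.Str.split? s "\n").getD []).filter (fun x => PySem.Str.isIn m x) = l :: t) :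
    PySem.Str.isIn m s = true := by
  have hl : l ∈ ((PySem.Str.split? s "\n").getD []).filter (fun x => PySem.Str.isIn m x) := by
    rw [hf]; exact List.mem_cons_self
  have h2 := List.mem_filter.mp hl
  exact pv_isIn_of_mem_lines s m l h2.1 (by simpa using h2.2)

-- ===== VERDICT (by name: the statement is the Claim_ definition above) =====
theorem parse_directive_py_spec : Claim_equal_parse_directive_py := by
  intro s _
  unfold Spec_parse_directive_py parse_directive_py parse_directive_py_alt
  dsimp only
  rw [pv_foldl_triple]
  simp only [pv_scan_eq]
  simp only [List.cons.injEq, Prod.mk.injEq, and_true, true_and]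
  refine ⟨?_, ?_, ?_⟩
  · cases hf : ((PySem.Str.split? s "\n").getD []).filter (fun x => PySem.Str.isIn "TYPE:" x) with
    | nil => split_ifs <;> rfl
    | cons l t => rw [if_pos (pv_guard_of_filter_cons s "TYPE:" l t hf)]; rfl
  · cases hf : ((PySem.Str.split? s "\n").getD []).filter (fun x => PySem.Str.isIn "INSTRUCTION:" x) with
    | nil => split_ifs <;> rfl
    | cons l t => rw [if_pos (pv_guard_of_filter_cons s "INSTRUCTION:" l t hf)]; rfl
  · cases hf : ((PySem.Str.split? s "\n").getD []).filter (fun x => PySem.Str.isIn "REASON:" x) with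
    | nil => split_ifs <;> rfl
    | cons l t => rw [if_pos (pv_guard_of_filter_cons s "REASON:" l t hf)]; rfl
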